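-- pv_equiv track=rewrite | github.com/jfin10/Lyricpose | backend/app/processing/pipeline.py | _detect_key
-- ===== SOURCE A (Python) =====
-- def _detect_key(notes: list[dict]) -> str:
--     """Simple key detection based on note frequency distribution."""
--     if not notes:
--         return "C"
--
--     note_counts = {}
--     for note in notes:
--         key = note["keys"][0].split("/")[0].upper()
--         note_counts[key] = note_counts.get(key, 0) + 1
--
--     # Major key profiles (simplified)
--     key_profiles = {
--         "C": ["C", "D", "E", "F", "G", "A", "B"],
--         "G": ["G", "A", "B", "C", "D", "E", "F#"],
--         "D": ["D", "E", "F#", "G", "A", "B", "C#"],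
--         "A": ["A", "B", "C#", "D", "E", "F#", "G#"],
--         "E": ["E", "F#", "G#", "A", "B", "C#", "D#"],
--         "F": ["F", "G", "A", "Bb", "C", "D", "E"],
--         "Bb": ["Bb", "C", "D", "Eb", "F", "G", "A"],
--         "Eb": ["Eb", "F", "G", "Ab", "Bb", "C", "D"],
--     }
--
--     best_key = "C"
--     best_score = 0
--
--     for key, scale_notes in key_profiles.items():
--         score = sum(note_counts.get(n, 0) for n in scale_notes)
--         if score > best_score:
--             best_score = score
--             best_key = key
--
--     return best_key
-- ===== SOURCE B (Python) =====
-- def _detect_key(notes: list[dict]) -> str: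
--     """Key detection via an inverted note->keys index and a single counting pass."""
--     key_profiles = {
--         "C": ["C", "D", "E", "F", "G", "A", "B"],
--         "G": ["G", "A", "B", "C", "D", "E", "F#"],
--         "D": ["D", "E", "F#", "G", "A", "B", "C#"],
--         "A": ["A", "B", "C#", "D", "E", "F#", "G#"],
--         "E": ["E", "F#", "G#", "A", "B", "C#", "D#"],
--         "F": ["F", "G", "A", "Bb", "C", "D", "E"],
--         "Bb": ["Bb", "C", "D", "Eb", "F", "G", "A"],
--         "Eb": ["Eb", "F", "G", "Ab", "Bb", "C", "D"],
--     }
--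
--     # Inverted index: note name -> keys whose scale contains it.
--     index = {}
--     for key, scale in key_profiles.items():
--         for n in scale:
--             index.setdefault(n, []).append(key)
--
--     # One pass over the notes, incrementing every key containing the note.
--     scores = {key: 0 for key in key_profiles}
--     for note in notes:
--         name = note["keys"][0].split("/")[0].upper()
--         for k in index.get(name, []):
--             scores[k] = scores[k] + 1
--
--     best_key = "C"
--     best_score = 0
--     for key in key_profiles:
--         if scores[key] > best_score:
--             best_score = scores[key]
--             best_key = key
--     return best_key
-- ===== Notes on version B (the rewrite author's own statement) =====
-- stated objective: alternative
-- what changed: Replaces the note-frequency dict plus per-key scale summation by an inverted index (note name -> keys containing it) built once, with a single counting pass over the notes that increments every matching key's score directly.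
import Mathlib
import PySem

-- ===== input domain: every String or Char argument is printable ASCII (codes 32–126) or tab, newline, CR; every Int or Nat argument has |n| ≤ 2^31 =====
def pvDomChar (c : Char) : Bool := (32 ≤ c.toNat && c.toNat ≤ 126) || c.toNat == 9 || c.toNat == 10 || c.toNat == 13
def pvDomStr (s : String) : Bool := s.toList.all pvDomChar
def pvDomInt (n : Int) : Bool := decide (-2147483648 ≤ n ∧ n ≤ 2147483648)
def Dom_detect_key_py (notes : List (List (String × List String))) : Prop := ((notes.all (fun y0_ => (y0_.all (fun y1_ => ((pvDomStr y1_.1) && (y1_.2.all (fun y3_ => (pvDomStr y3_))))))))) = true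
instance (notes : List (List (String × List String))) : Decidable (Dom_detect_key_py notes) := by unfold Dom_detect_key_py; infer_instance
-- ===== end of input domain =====

-- B replaces A's note-frequency dict + per-key scale summation by an inverted note->keys index and one counting pass; same result, similar cost (objective: alternative).
set_option maxRecDepth 40000


-- shared helpers: the literal key_profiles dict (as its .items() list) and the
-- note-name parsing `note["keys"][0].split("/")[0].upper()` (none = KeyError/IndexError)
def keyProfiles : List (String × List String) := [
  ("C", ["C", "D", "E", "F", "G", "A", "B"]),
  ("G", ["G", "A", "B", "C", "D", "E", "F#"]),
  ("D", ["D", "E", "F#", "G", "A", "B", "C#"]),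
  ("A", ["A", "B", "C#", "D", "E", "F#", "G#"]),
  ("E", ["E", "F#", "G#", "A", "B", "C#", "D#"]),
  ("F", ["F", "G", "A", "Bb", "C", "D", "E"]),
  ("Bb", ["Bb", "C", "D", "Eb", "F", "G", "A"]),
  ("Eb", ["Eb", "F", "G", "Ab", "Bb", "C", "D"])]

def parseNote (note : List (String × List String)) : Option String :=
  ((PySem.Dict.mk note).get? "keys").bind fun ks =>
    (PySem.List.pyGet? ks 0).map fun s =>
      PySem.Str.upper (PySem.List.pyGetD ((PySem.Str.split? s "/").getD []) 0 "")

-- ===== PORT A =====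
def detect_key_py (notes : List (List (String × List String))) : String :=
  if notes = [] then "C"
  else
    match notes.foldl
        (fun (acc : Option (PySem.Dict String Int)) note =>
          acc.bind fun counts => (parseNote note).map fun k =>
            counts.insert k (counts.getD k 0 + 1))
        (some PySem.Dict.empty) with
    | none => "C"   -- unreachable under Pre_ (Python raises here)
    | some counts =>
        (keyProfiles.foldl
          (fun (st : String × Int) kv =>
            let score := kv.2.foldl (fun s n => s + counts.getD n 0) 0
            if score > st.2 then (kv.1, score) else st)
          ("C", 0)).1

-- ===== PORT B =====
-- inverted index: note name -> keys whose scale contains it (built once from keyProfiles)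
def indexB : PySem.Dict String (List String) :=
  keyProfiles.foldl (fun d kv => kv.2.foldl (fun d n => d.modify n [] (· ++ [kv.1])) d)
    PySem.Dict.empty

-- scores = {key: 0 for key in key_profiles}
def scores0 : PySem.Dict String Int :=
  keyProfiles.foldl (fun d kv => d.insert kv.1 0) PySem.Dict.empty

def detect_key_py_alt (notes : List (List (String × List String))) : String :=
  match notes.foldl
      (fun (acc : Option (PySem.Dict String Int)) note =>
        acc.bind fun sc => (parseNote note).map fun name =>
          (indexB.getD name []).foldl (fun sc k => sc.insert k (sc.getD k 0 + 1)) sc)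
      (some scores0) with
  | none => "C"   -- unreachable under Pre_ (Python raises here)
  | some sc =>
      (keyProfiles.foldl
        (fun (st : String × Int) kv =>
          if sc.getD kv.1 0 > st.2 then (kv.1, sc.getD kv.1 0) else st)
        ("C", 0)).1

-- ===== PRECONDITION & SPEC =====
-- Pre_ excludes exactly the inputs where Python A raises: a note without a "keys"
-- entry (KeyError) or with an empty "keys" list (IndexError).
def Pre_detect_key_py (notes : List (List (String × List String))) : Prop :=
  ∀ note ∈ notes, ((PySem.Dict.mk note).get? "keys").getD [] ≠ []
instance (notes : List (List (String × List String))) : Decidable (Pre_detect_key_py notes) := by unfold Pre_detect_key_py; infer_instance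
def pvWitness_detect_key_py : (List (List (String × List String))) := [[("keys", ["c/4"])], [("keys", ["f#/5"])]]

def Spec_detect_key_py (notes : List (List (String × List String))) (out : String) : Prop := out = detect_key_py_alt notes
instance (notes : List (List (String × List String))) (out : String) : Decidable (Spec_detect_key_py notes out) := by unfold Spec_detect_key_py; infer_instance

-- ===== CLAIM (what is proved, stated in full; the proofs are below) =====
def Claim_equal_detect_key_py : Prop := ∀ (notes : List (List (String × List String))), Dom_detect_key_py notes → Pre_detect_key_py notes → Spec_detect_key_py notes (detect_key_py notes)

-- ===== LEMMAS AND PROOFS =====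

-- Option-threaded parse loop: when every note parses, it is the plain fold over the parsed names.
theorem foldl_parse_some {σ : Type} (f : σ → String → σ) (notes : List (List (String × List String)))
    (init : σ) (h : ∀ n ∈ notes, (parseNote n).isSome) :
    notes.foldl (fun (acc : Option σ) note => acc.bind fun s => (parseNote note).map fun k => f s k)
      (some init)
      = some ((notes.map fun n => (parseNote n).getD "").foldl f init) := by
  induction notes generalizing init with
  | nil => rfl
  | cons n t ih =>
      have hn := h n (List.mem_cons_self ..)
      obtain ⟨v, hv⟩ := Option.isSome_iff_exists.mp hn
      simp only [List.foldl_cons, List.map_cons, hv, Option.bind_some, Option.map_some,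
        Option.getD_some]
      exact ih (f init v) (fun m hm => h m (List.mem_cons_of_mem _ hm))

-- B's counting pass, per queried key.
theorem scoresB_getD (k : String) (ps : List String) (sc : PySem.Dict String Int) :
    (ps.foldl (fun sc name =>
        (indexB.getD name []).foldl (fun sc k => sc.insert k (sc.getD k 0 + 1)) sc) sc).getD k 0
      = sc.getD k 0 + (ps.map fun name => ((indexB.getD name []).count k : Int)).sum := by
  induction ps generalizing sc with
  | nil => simp only [List.foldl_nil, List.map_nil, List.sum_nil, add_zero]
  | cons p t ih =>
      simp only [List.foldl_cons, List.map_cons, List.sum_cons, ih,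
        PySem.Dict.getD_foldl_insert_add_one]
      ring

-- double counting: Σ_{n ∈ S} count n ps = Σ_{p ∈ ps} count p S (as integers)
theorem sum_count_comm (S ps : List String) :
    (S.map fun n => ((ps.count n : Nat) : Int)).sum
      = (ps.map fun p => ((S.count p : Nat) : Int)).sum := by
  induction ps with
  | nil => simp
  | cons p t ih =>
      simp only [List.count_cons, List.map_cons, List.sum_cons]
      have hsplit : (S.map fun n => (((t.count n + if p == n then 1 else 0 : Nat)) : Int)).sum
          = (S.map fun n => ((t.count n : Nat) : Int)).sum
            + (S.map fun n => (if p == n then (1 : Int) else 0)).sum := by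
        rw [← List.sum_map_add]
        apply congrArg List.sum
        apply List.map_congr_left
        intro n _
        push_cast
        split_ifs <;> simp
      rw [hsplit, ih, PySem.List.sum_map_ite_one_zero]
      have hcnt : S.countP (fun n => p == n) = S.count p := by
        rw [List.count_eq_countP]
        exact List.countP_congr (fun x _ => by rw [BEq.comm])
      rw [hcnt]
      ring

-- the pairs (note, key) the two index-building loops of B push, flattened
def pairsL : List (String × String) := keyProfiles.flatMap (fun kv => kv.2.map (fun n => (n, kv.1)))

theorem indexB_getD (name : String) :
    indexB.getD name [] = ((pairsL.filter (fun p => p.1 == name)).map (·.2)) := by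
  rw [show indexB = pairsL.foldl (fun d p => d.modify p.1 [] (· ++ [p.2])) PySem.Dict.empty from rfl,
      PySem.Dict.getD_foldl_modify_append, PySem.Dict.getD_empty]
  simp

-- each inverted-index entry counts k exactly as k's scale counts the name
theorem entry_count (kv : String × List String) (hkv : kv ∈ keyProfiles) (name : String) :
    (indexB.getD name []).count kv.1 = kv.2.count name := by
  rw [indexB_getD, List.count_eq_countP, List.countP_map, List.countP_filter, List.count_eq_countP]
  fin_cases hkv <;> simp [pairsL, keyProfiles, List.countP_cons]

theorem scores0_getD (kv : String × List String) (hkv : kv ∈ keyProfiles) :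
    scores0.getD kv.1 0 = 0 := by
  fin_cases hkv <;> rfl

-- ===== VERDICT (by name: the statement is the Claim_ definition above) =====
theorem detect_key_py_spec : Claim_equal_detect_key_py := by
  intro notes _ hpre
  unfold Spec_detect_key_py
  by_cases hnil : notes = []
  · subst hnil; rfl
  · have hsome : ∀ n ∈ notes, (parseNote n).isSome := by
      intro n hn
      have hne := hpre n hn
      unfold parseNote
      cases hg : ((PySem.Dict.mk n).get? "keys") with
      | none => simp [hg] at hne
      | some ks =>
          rw [hg] at hne
          simp only [Option.getD_some] at hne
          cases ks with
          | nil => simp at hne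
          | cons a l => simp [PySem.List.pyGet?, PySem.List.pyIdx?]
    unfold detect_key_py detect_key_py_alt
    rw [if_neg hnil, foldl_parse_some _ _ _ hsome, foldl_parse_some _ _ _ hsome]
    dsimp only
    set ps := notes.map fun n => (parseNote n).getD "" with hps
    suffices hfold :
        keyProfiles.foldl
          (fun (st : String × Int) kv =>
            let score := kv.2.foldl (fun s n =>
              s + (ps.foldl (fun counts k => counts.insert k (counts.getD k 0 + 1))
                    PySem.Dict.empty).getD n 0) 0
            if score > st.2 then (kv.1, score) else st) ("C", 0)
        = keyProfiles.foldl
          (fun (st : String × Int) kv =>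
            if (ps.foldl (fun sc name =>
                  (indexB.getD name []).foldl (fun sc k => sc.insert k (sc.getD k 0 + 1)) sc)
                scores0).getD kv.1 0 > st.2
            then (kv.1, (ps.foldl (fun sc name =>
                  (indexB.getD name []).foldl (fun sc k => sc.insert k (sc.getD k 0 + 1)) sc)
                scores0).getD kv.1 0)
            else st) ("C", 0) by
      rw [hfold]
    apply PySem.List.foldl_congr_mem
    intro st kv hkv
    have hscore : kv.2.foldl (fun s n =>
        s + (ps.foldl (fun counts k => counts.insert k (counts.getD k 0 + 1)) PySem.Dict.empty).getD n 0) 0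
        = (ps.foldl (fun sc name =>
            (indexB.getD name []).foldl (fun sc k => sc.insert k (sc.getD k 0 + 1)) sc) scores0).getD kv.1 0 := by
      rw [scoresB_getD, scores0_getD kv hkv, PySem.List.foldl_add]
      have hc : (kv.2.map fun n =>
          (ps.foldl (fun counts k => counts.insert k (counts.getD k 0 + 1)) PySem.Dict.empty).getD n 0)
          = kv.2.map fun n => ((ps.count n : Nat) : Int) := by
        apply List.map_congr_left
        intro n _
        rw [PySem.Dict.getD_foldl_insert_add_one, PySem.Dict.getD_empty]
        ring
      have he : (ps.map fun name => (((indexB.getD name []).count kv.1 : Nat) : Int))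
          = ps.map fun p => ((kv.2.count p : Nat) : Int) := by
        apply List.map_congr_left
        intro name _
        exact congrArg _ (entry_count kv hkv name)
      rw [hc, sum_count_comm, ← he]
    simp only [hscore]
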